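-- pv_equiv track=rewrite | github.com/Gyanesha/Quine-Mccluskey | Q-M/tables.py | __reduce_simple_xnor_terms
-- ===== SOURCE A (Python) =====
-- def __reduce_simple_xnor_terms(t1, t2):
--
--     difft10 = 0
--     difft20 = 0
--     ret = []
--     for (t1c, t2c) in zip(t1, t2):
--         if t1c == '^' or t2c == '^' or t1c == '~' or t2c == '~':
--             return None
--         elif t1c != t2c:
--             ret.append('~')
--             if t1c == '0':
--                 difft10 += 1
--             else:
--                 difft20 += 1
--         else:
--             ret.append(t1c)
--     if (difft10 == 2 and difft20 == 0) or (difft10 == 0 and difft20 == 2):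
--         return "".join(ret)
--     return None
-- ===== SOURCE B (Python) =====
-- def __reduce_simple_xnor_terms(t1, t2):
--     n = min(len(t1), len(t2))
--     a = list(t1[:n])
--     b = list(t2[:n])
--     # validation: any '^' or '~' in the compared region kills the term
--     if '^' in a or '~' in a or '^' in b or '~' in b:
--         return None
--     # indices where the terms differ
--     diffs = [i for i in range(n) if a[i] != b[i]]
--     if len(diffs) != 2:
--         return None
--     i, j = diffs
--     # both differing positions must be on the same side ('0' in t1, or non-'0' in t1)
--     if (a[i] == '0') != (a[j] == '0'):
--         return None
--     a[i] = a[j] = '~'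
--     return ''.join(a)
-- ===== Notes on version B (the rewrite author's own statement) =====
-- stated objective: alternative
-- what changed: Instead of a fused scan with two direction counters and an output accumulator, B truncates both terms, validates by membership tests, collects the list of differing indices, accepts exactly two same-side indices, and produces the result by patching '~' into a copy of t1 at those two indices.
import Mathlib
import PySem

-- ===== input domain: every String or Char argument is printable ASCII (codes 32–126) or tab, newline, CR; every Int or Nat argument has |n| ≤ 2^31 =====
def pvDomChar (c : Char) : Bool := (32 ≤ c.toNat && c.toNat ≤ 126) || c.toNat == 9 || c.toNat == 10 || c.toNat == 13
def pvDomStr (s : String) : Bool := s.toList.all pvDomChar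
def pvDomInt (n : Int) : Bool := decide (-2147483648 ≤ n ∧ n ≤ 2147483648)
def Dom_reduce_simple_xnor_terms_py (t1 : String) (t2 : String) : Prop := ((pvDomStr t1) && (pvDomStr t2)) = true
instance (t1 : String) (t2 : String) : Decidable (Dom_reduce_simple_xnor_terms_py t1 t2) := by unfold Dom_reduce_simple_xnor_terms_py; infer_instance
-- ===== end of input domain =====

-- B replaces A's fused scan (two direction counters + output accumulator) by truncation, membership validation, a differing-index list and patching '~' into a copy of t1 (alternative decomposition, same cost).


-- ===== PORT A =====
-- A's for-loop over zip(t1, t2) with the two counters and the ret accumulator, then the final test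
def pvA_loop : List (Char × Char) → Int → Int → List Char → Option String
  | [], difft10, difft20, ret =>
      if (difft10 = 2 ∧ difft20 = 0) ∨ (difft10 = 0 ∧ difft20 = 2) then some (String.mk ret) else none
  | (t1c, t2c) :: rest, difft10, difft20, ret =>
      if t1c = '^' ∨ t2c = '^' ∨ t1c = '~' ∨ t2c = '~' then none
      else if t1c ≠ t2c then
        if t1c = '0' then pvA_loop rest (difft10 + 1) difft20 (ret ++ ['~'])
        else pvA_loop rest difft10 (difft20 + 1) (ret ++ ['~'])
      else pvA_loop rest difft10 difft20 (ret ++ [t1c])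

def reduce_simple_xnor_terms_py (t1 : String) (t2 : String) : Option String :=
  pvA_loop (t1.toList.zip t2.toList) 0 0 []

-- ===== PORT B =====
-- diffs = [i for i in range(n) if a[i] != b[i]]  (i < n = len(a) = len(b), so indexing is total; getD with a dummy default is exact)
def pvIdxDiffs (a b : List Char) (n : Nat) : List Nat :=
  (List.range n).filter (fun i => a.getD i ' ' ≠ b.getD i ' ')

def reduce_simple_xnor_terms_py_alt (t1 : String) (t2 : String) : Option String :=
  let n := min t1.toList.length t2.toList.length      -- n = min(len(t1), len(t2))
  let a := t1.toList.take n                           -- list(t1[:n])  (0 ≤ n ≤ len, so the slice is exactly take n)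
  let b := t2.toList.take n                           -- list(t2[:n])
  if a.contains '^' || a.contains '~' || b.contains '^' || b.contains '~' then none
  else
    match pvIdxDiffs a b n with                       -- len(diffs) != 2 → None, else unpack i, j
    | [i, j] =>
        if decide (a.getD i ' ' = '0') ≠ decide (a.getD j ' ' = '0') then none
        else some (String.mk ((a.set i '~').set j '~'))   -- a[i] = a[j] = '~'; ''.join(a)
    | _ => none

-- ===== PRECONDITION & SPEC =====
def Spec_reduce_simple_xnor_terms_py (t1 : String) (t2 : String) (out : Option String) : Prop := out = reduce_simple_xnor_terms_py_alt t1 t2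
instance (t1 : String) (t2 : String) (out : Option String) : Decidable (Spec_reduce_simple_xnor_terms_py t1 t2 out) := by unfold Spec_reduce_simple_xnor_terms_py; infer_instance

-- ===== CLAIM (what is proved, stated in full; the proofs are below) =====
def Claim_equal_reduce_simple_xnor_terms_py : Prop := ∀ (t1 : String) (t2 : String), Dom_reduce_simple_xnor_terms_py t1 t2 → Spec_reduce_simple_xnor_terms_py t1 t2 (reduce_simple_xnor_terms_py t1 t2)

-- ===== LEMMAS AND PROOFS =====

-- abbreviations used only by the proofs
def pvBad (p : Char × Char) : Bool := p.1 = '^' || p.1 = '~' || p.2 = '^' || p.2 = '~'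
def pvFlags (l : List (Char × Char)) : List Bool :=
  (l.filter (fun p => p.1 ≠ p.2)).map (fun p => decide (p.1 = '0'))
def pvOut (l : List (Char × Char)) : List Char :=
  l.map (fun p => if p.1 ≠ p.2 then '~' else p.1)

-- loop invariant: pvA_loop is bad-check, then the count condition, then ret ++ the joined output
theorem pvA_loop_char (l : List (Char × Char)) : ∀ (d10 d20 : Int) (ret : List Char),
    pvA_loop l d10 d20 ret =
      if l.any pvBad then none
      else if (d10 + ((pvFlags l).count true : Int) = 2 ∧ d20 + ((pvFlags l).count false : Int) = 0)
            ∨ (d10 + ((pvFlags l).count true : Int) = 0 ∧ d20 + ((pvFlags l).count false : Int) = 2) then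
        some (String.mk (ret ++ pvOut l))
      else none := by
  induction l with
  | nil => intro d10 d20 ret; simp [pvA_loop, pvFlags, pvOut]
  | cons p rest ih =>
    intro d10 d20 ret
    obtain ⟨a, b⟩ := p
    by_cases hbad : a = '^' ∨ b = '^' ∨ a = '~' ∨ b = '~'
    · rw [pvA_loop, if_pos hbad]
      have : pvBad (a, b) = true := by
        simp only [pvBad]; rcases hbad with h | h | h | h <;> simp [h]
      simp [List.any_cons, this]
    · have hbad' : pvBad (a, b) = false := by
        simp only [pvBad, Bool.or_eq_false_iff, decide_eq_false_iff_not]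
        tauto
      rw [pvA_loop, if_neg hbad]
      by_cases hne : a = b
      · subst hne
        simp only [ne_eq, not_true_eq_false, if_false, ite_not]
        rw [ih]
        simp [pvFlags, pvOut, hbad']
      · by_cases h0 : a = '0'
        · subst h0
          simp only [ne_eq, hne, not_false_iff, if_true, if_pos]
          rw [ih]
          simp [pvFlags, pvOut, hbad', hne, List.count_cons]
          have harith : ∀ x y : ℤ, x + 1 + y = x + (y + 1) := fun x y => by ring
          rw [harith]
        · simp only [ne_eq, hne, not_false_iff, if_true, h0, if_false]
          rw [ih]
          simp [pvFlags, pvOut, hbad', hne, h0, List.count_cons]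
          have harith : ∀ x y : ℤ, x + 1 + y = x + (y + 1) := fun x y => by ring
          rw [harith]

theorem pv_count_length (fl : List Bool) : fl.count true + fl.count false = fl.length := by
  induction fl with
  | nil => simp
  | cons f rest ih => cases f <;> simp [List.count_cons] <;> omega

-- A's (2,0)/(0,2) counter test equals "two flags, both on the same side"
theorem pv_cond_iff (fl : List Bool) :
    ((((fl.count true : Int) = 2 ∧ (fl.count false : Int) = 0)
      ∨ ((fl.count true : Int) = 0 ∧ (fl.count false : Int) = 2))
     ↔ (fl.length = 2 ∧ fl.getD 0 true = fl.getD 1 true)) := by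
  match fl with
  | [] => simp
  | [f] => cases f <;> simp
  | [f1, f2] => cases f1 <;> cases f2 <;> simp [List.count_cons]
  | f1 :: f2 :: f3 :: rest =>
    have h := pv_count_length (f1 :: f2 :: f3 :: rest)
    simp only [List.length_cons] at h ⊢
    constructor
    · intro hc; exfalso; rcases hc with ⟨h1, h2⟩ | ⟨h1, h2⟩ <;> omega
    · intro hc; omega

-- t1[:min] and t2[:min] are the two projections of zip(t1, t2)
theorem pv_take_fst : ∀ (xs ys : List Char),
    xs.take (min xs.length ys.length) = (xs.zip ys).map Prod.fst := by
  intro xs; induction xs with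
  | nil => intro ys; simp
  | cons x xs ih =>
    intro ys; cases ys with
    | nil => simp
    | cons y ys => simp [Nat.succ_min_succ, ih ys]

theorem pv_take_snd : ∀ (xs ys : List Char),
    ys.take (min xs.length ys.length) = (xs.zip ys).map Prod.snd := by
  intro xs; induction xs with
  | nil => intro ys; simp
  | cons x xs ih =>
    intro ys; cases ys with
    | nil => simp
    | cons y ys => simp [Nat.succ_min_succ, ih ys]

-- filtering a list equals filtering its index range and reading the elements back
theorem pv_filter_range_map {α : Type} : ∀ (xs : List α) (p : α → Bool) (d : α),
    ((List.range xs.length).filter (fun i => p (xs.getD i d))).map (fun i => xs.getD i d)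
      = xs.filter p := by
  intro xs; induction xs with
  | nil => intro p d; simp
  | cons x xs ih =>
    intro p d
    rw [List.length_cons, List.range_succ_eq_map]
    simp only [List.filter_cons, List.getD_cons_zero, List.filter_map, List.map_map]
    by_cases hp : p x = true
    · simp only [hp, if_true]
      rw [List.map_cons]
      congr 1
      · have := ih p d
        simpa [Function.comp] using this
    · simp only [hp, if_false, Bool.false_eq_true]
      have := ih p d
      simpa [Function.comp, hp] using this

-- the four membership validations equal A's per-pair bad test
theorem pv_bad_eq (l : List (Char × Char)) :
    ((l.map Prod.fst).contains '^' || (l.map Prod.fst).contains '~'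
      || (l.map Prod.snd).contains '^' || (l.map Prod.snd).contains '~') = l.any pvBad := by
  rw [Bool.eq_iff_iff]
  simp only [Bool.or_eq_true, List.contains_iff_mem, List.mem_map, List.any_eq_true, pvBad,
    decide_eq_true_eq]
  aesop

-- reading B's index tests through the zipped list
theorem pv_getD_map_fst (l : List (Char × Char)) (i : Nat) (h : i < l.length) :
    (l.map Prod.fst).getD i ' ' = (l.getD i (' ', ' ')).1 := by
  rw [List.getD_eq_getElem _ _ (by simpa using h), List.getD_eq_getElem _ _ h, List.getElem_map]

theorem pv_getD_map_snd (l : List (Char × Char)) (i : Nat) (h : i < l.length) :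
    (l.map Prod.snd).getD i ' ' = (l.getD i (' ', ' ')).2 := by
  rw [List.getD_eq_getElem _ _ (by simpa using h), List.getD_eq_getElem _ _ h, List.getElem_map]

def pvIdxL (l : List (Char × Char)) : List Nat :=
  (List.range l.length).filter (fun i => (l.getD i (' ', ' ')).1 ≠ (l.getD i (' ', ' ')).2)

theorem pv_idx_eq (l : List (Char × Char)) :
    pvIdxDiffs (l.map Prod.fst) (l.map Prod.snd) l.length = pvIdxL l := by
  unfold pvIdxDiffs pvIdxL
  apply List.filter_congr
  intro i hi
  have h : i < l.length := List.mem_range.mp hi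
  rw [pv_getD_map_fst l i h, pv_getD_map_snd l i h]

theorem pv_mem_idxL (l : List (Char × Char)) (i : Nat) :
    i ∈ pvIdxL l ↔ i < l.length ∧ (l.getD i (' ', ' ')).1 ≠ (l.getD i (' ', ' ')).2 := by
  simp [pvIdxL, List.mem_filter, List.mem_range]

theorem pv_flags_eq (l : List (Char × Char)) :
    pvFlags l = (pvIdxL l).map (fun i => decide ((l.getD i (' ', ' ')).1 = '0')) := by
  unfold pvFlags
  rw [← pv_filter_range_map l (fun p => decide (p.1 ≠ p.2)) (' ', ' ')]
  rw [List.map_map]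
  rfl

-- when the differing indices are exactly [i, j], A's joined output is t1 patched at i and j
theorem pv_out_eq (l : List (Char × Char)) (i j : Nat) (hidx : pvIdxL l = [i, j]) :
    pvOut l = ((l.map Prod.fst).set i '~').set j '~' := by
  have hi0 := (pv_mem_idxL l i).mp (by rw [hidx]; simp)
  have hj0 := (pv_mem_idxL l j).mp (by rw [hidx]; simp)
  have hi : l[i].1 ≠ l[i].2 := by rw [← List.getD_eq_getElem l (' ', ' ') hi0.1]; exact hi0.2
  have hj : l[j].1 ≠ l[j].2 := by rw [← List.getD_eq_getElem l (' ', ' ') hj0.1]; exact hj0.2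
  apply List.ext_getElem
  · simp [pvOut]
  · intro k hk1 hk2
    have hk : k < l.length := by simpa [pvOut] using hk1
    have hmem : k ∈ pvIdxL l ↔ (k = i ∨ k = j) := by rw [hidx]; simp
    rw [pv_mem_idxL, List.getD_eq_getElem l (' ', ' ') hk] at hmem
    have hmem' : l[k].1 ≠ l[k].2 ↔ (k = i ∨ k = j) :=
      ⟨fun h => hmem.mp ⟨hk, h⟩, fun h => (hmem.mpr h).2⟩
    have e1 : (pvOut l)[k] = if l[k].1 ≠ l[k].2 then '~' else l[k].1 := by
      simp [pvOut]
    have e2 : (((l.map Prod.fst).set i '~').set j '~')[k]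
        = if j = k then '~' else if i = k then '~' else l[k].1 := by
      rw [List.getElem_set, List.getElem_set, List.getElem_map]
    rw [e1, e2]
    by_cases hcase : k = i ∨ k = j
    · rw [if_pos (hmem'.mpr hcase)]
      rcases hcase with rfl | rfl
      · by_cases hjk : j = k
        · rw [if_pos hjk]
        · rw [if_neg hjk, if_pos rfl]
      · rw [if_pos rfl]
    · push_neg at hcase
      rw [if_neg (fun h => hcase.1 ((hmem'.mp h).resolve_right hcase.2)),
        if_neg (fun h => hcase.2 h.symm), if_neg (fun h => hcase.1 h.symm)]

-- ===== VERDICT =====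
theorem reduce_simple_xnor_terms_py_spec : Claim_equal_reduce_simple_xnor_terms_py := by
  intro t1 t2 _
  unfold Spec_reduce_simple_xnor_terms_py reduce_simple_xnor_terms_py
    reduce_simple_xnor_terms_py_alt
  rw [pvA_loop_char]
  dsimp only
  rw [pv_take_fst t1.toList t2.toList, pv_take_snd t1.toList t2.toList,
    show min t1.toList.length t2.toList.length = (t1.toList.zip t2.toList).length from
      (List.length_zip).symm,
    pv_bad_eq, pv_idx_eq]
  set l := t1.toList.zip t2.toList with hl
  simp only [List.nil_append, zero_add]
  cases hbad : l.any pvBad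
  · simp only [Bool.false_eq_true, if_false]
    have hflags := pv_flags_eq l
    have hcond := pv_cond_iff (pvFlags l)
    have hlenf : (pvFlags l).length = (pvIdxL l).length := by rw [hflags]; simp
    cases hId : pvIdxL l with
    | nil =>
      rw [if_neg (fun hC => by
        have h2 := (hcond.mp hC).1
        rw [hlenf, hId] at h2; simp at h2)]
    | cons i rest =>
      cases rest with
      | nil =>
        rw [if_neg (fun hC => by
          have h2 := (hcond.mp hC).1
          rw [hlenf, hId] at h2; simp at h2)]
      | cons j rest2 =>
        cases rest2 with
        | nil =>
          -- exactly two differing indices i, j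
          dsimp only
          have hi0 := (pv_mem_idxL l i).mp (by rw [hId]; simp)
          have hj0 := (pv_mem_idxL l j).mp (by rw [hId]; simp)
          rw [pv_getD_map_fst l i hi0.1, pv_getD_map_fst l j hj0.1]
          have hfl : pvFlags l = [decide ((l.getD i (' ', ' ')).1 = '0'),
              decide ((l.getD j (' ', ' ')).1 = '0')] := by
            rw [hflags, hId]; rfl
          by_cases hxy : decide ((l.getD i (' ', ' ')).1 = '0')
              = decide ((l.getD j (' ', ' ')).1 = '0')
          · rw [if_pos (hcond.mpr (by rw [hfl]; exact ⟨rfl, hxy⟩)), if_neg (by simpa using hxy)]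
            rw [pv_out_eq l i j hId]
          · rw [if_neg (fun hC => hxy (by simpa [hfl] using (hcond.mp hC).2)),
              if_pos (by simpa using hxy)]
        | cons k rest3 =>
          rw [if_neg (fun hC => by
            have h2 := (hcond.mp hC).1
            rw [hlenf, hId] at h2; simp at h2)]
  · simp
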